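-- pv_equiv track=rewrite | github.com/Abhi-data-analyst/Python_Data_Analytics_Journey | Day10_L2.py | valid_sum
-- ===== SOURCE A (Python) =====
-- def valid_sum(sales):
--     total=0
--     for x in sales:
--         if x==-1:
--             continue
--         else:
--             total+=x
--     return total
-- ===== SOURCE B (Python) =====
-- def valid_sum(sales):
--     return sum(sales) + sales.count(-1)
-- ===== Notes on version B (the rewrite author's own statement) =====
-- stated objective: simpler
-- what changed: Replaces the guarded accumulation loop by a closed-form correction: sum everything, then add back one per occurrence of -1.
import Mathlib
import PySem

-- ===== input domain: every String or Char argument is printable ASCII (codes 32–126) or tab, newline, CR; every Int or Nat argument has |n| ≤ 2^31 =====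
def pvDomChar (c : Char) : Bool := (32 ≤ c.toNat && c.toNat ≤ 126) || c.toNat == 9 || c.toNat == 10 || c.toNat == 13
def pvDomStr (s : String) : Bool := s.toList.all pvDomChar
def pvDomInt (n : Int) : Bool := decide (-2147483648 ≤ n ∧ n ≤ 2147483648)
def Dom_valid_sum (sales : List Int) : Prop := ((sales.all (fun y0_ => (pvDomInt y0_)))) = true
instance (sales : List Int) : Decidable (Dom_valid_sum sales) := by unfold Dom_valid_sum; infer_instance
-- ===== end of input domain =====

-- B: sum everything then add back one per -1 occurrence (simpler, no per-element branch)

-- ===== PORT A =====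
def valid_sum (sales : List Int) : Int :=
  sales.foldl (fun total x => if x = -1 then total else total + x) 0

-- ===== PORT B =====
def valid_sum_alt (sales : List Int) : Int :=
  sales.sum + (PySem.List.count sales (-1) : Int)

-- ===== PRECONDITION & SPEC =====
def Spec_valid_sum (sales : List Int) (out : Int) : Prop := out = valid_sum_alt sales
instance (sales : List Int) (out : Int) : Decidable (Spec_valid_sum sales out) := by unfold Spec_valid_sum; infer_instance

-- ===== CLAIM (what is proved, stated in full; the proofs are below) =====
def Claim_equal_valid_sum : Prop := ∀ (sales : List Int), Dom_valid_sum sales → Spec_valid_sum sales (valid_sum sales)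

-- ===== LEMMAS AND PROOFS =====
theorem valid_sum_foldl (sales : List Int) (t : Int) :
    sales.foldl (fun total x => if x = -1 then total else total + x) t
      = t + sales.sum + (PySem.List.count sales (-1) : Int) := by
  induction sales generalizing t with
  | nil => simp [PySem.List.count]
  | cons x xs ih =>
    simp only [List.foldl_cons, ih, List.sum_cons, PySem.List.count]
    by_cases h : x = -1 <;> simp [h] <;> ring

-- ===== VERDICT (by name: the statement is the Claim_ definition above) =====
theorem valid_sum_spec : Claim_equal_valid_sum := by
  intro sales _
  show _ = _
  simp [valid_sum, valid_sum_alt, valid_sum_foldl]
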